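-- pv_equiv track=rewrite | github.com/kongguanqiao/Algorithm_Implementation | util.py | S_insert
-- ===== SOURCE A (Python) =====
-- def S_insert(sys: int, d: int, y: int, n: int) -> int:
--     """根据原状态y，以及遍历序号数d，插入0，得到当前遍历数
--
--     Args:
--         sys (int): 采取的进制数
--         d (int): 遍历序号数，是一个sys进制的数字
--         y (int): 状态数，是一个2进制的数字，共有n位
--         n (int): 状态y的位数
--
--     Returns:
--         int: 返回补全后的遍历数
--     """
--     u = 0
--     for i in range(n):
--         s, y = y & 1, y >> 1 # 获取当前武器状态
--         if s == 1:
--             m, d = d % (sys), d // sys  # 当前武器可用，则取到该武器的目标 m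
--             u += (sys ** i) * m
--     return u
-- ===== SOURCE B (Python) =====
-- def S_insert(sys: int, d: int, y: int, n: int) -> int:
--     # Horner evaluation: extract per-position items (next digit of d where the
--     # bit is set, else 0), then evaluate the digit string high-to-low with
--     # u = u*sys + item.  No power sys**i is ever computed.
--     items = []
--     for _ in range(n):
--         if y & 1:
--             items.append(d % sys)
--             d //= sys
--         else:
--             items.append(0)
--         y >>= 1
--     u = 0
--     for m in reversed(items):
--         u = u * sys + m
--     return u
-- ===== Notes on version B (the rewrite author's own statement) =====
-- stated objective: alternative
-- what changed: Replaces A's accumulator loop that computes sys**i at each set bit by Horner's scheme: build the per-position digit list low-to-high, then evaluate it high-to-low with u = u*sys + digit, never computing a power.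
import Mathlib
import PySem

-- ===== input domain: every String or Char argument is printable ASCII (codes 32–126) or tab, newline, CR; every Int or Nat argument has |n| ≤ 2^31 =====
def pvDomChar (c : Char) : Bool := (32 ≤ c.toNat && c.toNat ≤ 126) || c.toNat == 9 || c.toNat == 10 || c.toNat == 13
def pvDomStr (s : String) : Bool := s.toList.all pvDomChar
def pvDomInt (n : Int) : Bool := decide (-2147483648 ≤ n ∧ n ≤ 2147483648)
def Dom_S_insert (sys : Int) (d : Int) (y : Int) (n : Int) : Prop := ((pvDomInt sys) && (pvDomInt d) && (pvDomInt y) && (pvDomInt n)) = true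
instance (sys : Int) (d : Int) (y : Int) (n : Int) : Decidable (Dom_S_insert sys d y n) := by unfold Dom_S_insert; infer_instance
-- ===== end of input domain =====

-- B replaces A's power-and-accumulator loop by Horner's scheme: build the per-position
-- digit list, then fold it high-to-low with u = u*sys + digit (no sys**i); objective: alternative.

-- ===== PORT A =====
-- state: (u, y, d), threaded through one loop over range(n)
def S_insert (sys : Int) (d : Int) (y : Int) (n : Int) : Int :=
  ((PySem.List.pyRange 0 n 1).foldl
    (fun (st : Int × Int × Int) (i : Int) =>
      let s := PySem.Int.band st.2.1 1
      let y' := st.2.1 >>> (1 : Nat)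
      if s = 1 then
        (st.1 + sys ^ i.toNat * PySem.Int.mod st.2.2 sys, y', PySem.Int.floordiv st.2.2 sys)
      else
        (st.1, y', st.2.2))
    (0, y, d)).1

-- ===== PORT B =====
-- pass 1: build the per-position item list (state: items, y, d); pass 2: Horner fold over reversed items
def S_insert_alt (sys : Int) (d : Int) (y : Int) (n : Int) : Int :=
  (((PySem.List.pyRange 0 n 1).foldl
      (fun (st : List Int × Int × Int) (_ : Int) =>
        if PySem.Int.band st.2.1 1 ≠ 0 then
          (st.1 ++ [PySem.Int.mod st.2.2 sys], st.2.1 >>> (1 : Nat), PySem.Int.floordiv st.2.2 sys)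
        else
          (st.1 ++ [(0 : Int)], st.2.1 >>> (1 : Nat), st.2.2))
      ([], y, d)).1).reverse.foldl (fun (u : Int) (m : Int) => u * sys + m) 0

-- ===== PRECONDITION & SPEC =====
-- Pre_ excludes exactly the inputs on which Python A raises ZeroDivisionError:
-- sys == 0 while some of the low n bits of y is set (i.e. 2^n does not divide y).
def Pre_S_insert (sys : Int) (_d : Int) (y : Int) (n : Int) : Prop :=
  sys ≠ 0 ∨ ((2 : Int) ^ n.toNat ∣ y)
instance (sys : Int) (d : Int) (y : Int) (n : Int) : Decidable (Pre_S_insert sys d y n) := by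
  unfold Pre_S_insert; infer_instance
def pvWitness_S_insert : Int × Int × Int × Int := (3, 7, 5, 3)

def Spec_S_insert (sys : Int) (d : Int) (y : Int) (n : Int) (out : Int) : Prop := out = S_insert_alt sys d y n
instance (sys : Int) (d : Int) (y : Int) (n : Int) (out : Int) : Decidable (Spec_S_insert sys d y n out) := by unfold Spec_S_insert; infer_instance

-- ===== CLAIM =====
def Claim_equal_S_insert : Prop := ∀ (sys : Int) (d : Int) (y : Int) (n : Int), Dom_S_insert sys d y n → Pre_S_insert sys d y n → Spec_S_insert sys d y n (S_insert sys d y n)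

-- ===== LEMMAS AND PROOFS =====

-- proof-side helpers: the Horner value of the low m bits, and the item list both programs induce
def S_insert_rec (sys : Int) : Int → Int → Nat → Int
  | _, _, 0 => 0
  | d, y, m + 1 =>
    if PySem.Int.band y 1 ≠ 0 then
      PySem.Int.mod d sys + sys * S_insert_rec sys (PySem.Int.floordiv d sys) (y >>> (1 : Nat)) m
    else
      sys * S_insert_rec sys d (y >>> (1 : Nat)) m

def digitsOf (sys : Int) : Int → Int → Nat → List Int
  | _, _, 0 => []
  | d, y, m + 1 =>
    if PySem.Int.band y 1 ≠ 0 then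
      PySem.Int.mod d sys :: digitsOf sys (PySem.Int.floordiv d sys) (y >>> (1 : Nat)) m
    else
      0 :: digitsOf sys d (y >>> (1 : Nat)) m

theorem range_succ_cons (n : Nat) : List.range (n + 1) = 0 :: (List.range n).map Nat.succ := by
  induction n with
  | zero => rfl
  | succ n ih =>
    calc List.range (n + 1 + 1) = List.range (n + 1) ++ [n + 1] := List.range_succ
      _ = (0 :: (List.range n).map Nat.succ) ++ [n + 1] := by rw [ih]
      _ = 0 :: ((List.range n).map Nat.succ ++ ([n].map Nat.succ)) := rfl
      _ = 0 :: (List.range (n + 1)).map Nat.succ := by rw [← List.map_append, ← List.range_succ]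

-- loop invariant: A's fold over the positions s, s+1, …, s+m-1 starting from (u, y, d)
-- contributes exactly sys^s times the Horner value of the remaining m bits.
theorem loop_eq (sys : Int) : ∀ (m s : Nat) (u y d : Int),
    (((List.range m).map (fun k : Nat => ((k + s : Nat) : Int))).foldl
      (fun (st : Int × Int × Int) (i : Int) =>
        let sb := PySem.Int.band st.2.1 1
        let y' := st.2.1 >>> (1 : Nat)
        if sb = 1 then
          (st.1 + sys ^ i.toNat * PySem.Int.mod st.2.2 sys, y', PySem.Int.floordiv st.2.2 sys)
        else
          (st.1, y', st.2.2))
      (u, y, d)).1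
    = u + sys ^ s * S_insert_rec sys d y m := by
  intro m
  induction m with
  | zero => intro s u y d; simp [S_insert_rec]
  | succ m ih =>
    intro s u y d
    rw [range_succ_cons]
    have hmap : (List.map (fun k : Nat => ((k + s : Nat) : Int)) (List.map Nat.succ (List.range m)))
        = List.map (fun k : Nat => ((k + (s + 1) : Nat) : Int)) (List.range m) := by
      rw [List.map_map]; apply List.map_congr_left; intro k _
      simp only [Function.comp_apply]
      congr 1
      omega
    have hb : PySem.Int.band y 1 = 0 ∨ PySem.Int.band y 1 = 1 := by
      rw [PySem.Int.band_one, PySem.Int.mod_eq_emod_of_pos (by norm_num : (0:Int) < 2)]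
      exact Int.emod_two_eq_zero_or_one y
    rcases hb with h | h
    · simp only [List.map_cons, List.foldl_cons, hmap, h]
      rw [ih (s + 1)]
      simp only [S_insert_rec, h, Int.toNat_natCast]
      norm_num [pow_succ]
      ring
    · simp only [List.map_cons, List.foldl_cons, hmap, h]
      rw [ih (s + 1)]
      simp only [S_insert_rec, h, Int.toNat_natCast]
      norm_num [pow_succ]
      ring

-- B's first loop ignores the loop variable: over any list it appends digitsOf of its length
theorem b_loop_eq (sys : Int) : ∀ (l : List Int) (acc : List Int) (y d : Int),
    (l.foldl
      (fun (st : List Int × Int × Int) (_ : Int) =>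
        if PySem.Int.band st.2.1 1 ≠ 0 then
          (st.1 ++ [PySem.Int.mod st.2.2 sys], st.2.1 >>> (1 : Nat), PySem.Int.floordiv st.2.2 sys)
        else
          (st.1 ++ [(0 : Int)], st.2.1 >>> (1 : Nat), st.2.2))
      (acc, y, d)).1 = acc ++ digitsOf sys d y l.length := by
  intro l
  induction l with
  | nil => intro acc y d; simp [digitsOf]
  | cons x xs ih =>
    intro acc y d
    by_cases h : PySem.Int.band y 1 ≠ 0
    · simp only [List.foldl_cons, if_pos h, ih, List.length_cons, digitsOf,
        List.append_assoc, List.singleton_append]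
    · simp only [List.foldl_cons, ih, List.length_cons, digitsOf, h, ite_false,
        List.append_assoc, List.singleton_append]

-- Horner fold of the reversed item list equals the recursion
theorem horner_digits (sys : Int) : ∀ (m : Nat) (d y : Int) (u : Int),
    (digitsOf sys d y m).reverse.foldl (fun (u : Int) (a : Int) => u * sys + a) u
      = u * sys ^ m + S_insert_rec sys d y m := by
  intro m
  induction m with
  | zero => intro d y u; simp [digitsOf, S_insert_rec]
  | succ m ih =>
    intro d y u
    by_cases h : PySem.Int.band y 1 = 0
    · simp [digitsOf, S_insert_rec, h, ih]
      ring
    · simp [digitsOf, S_insert_rec, h, ih]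
      ring

theorem alt_eq_rec (sys d y n : Int) : S_insert_alt sys d y n = S_insert_rec sys d y n.toNat := by
  unfold S_insert_alt
  rw [b_loop_eq sys (PySem.List.pyRange 0 n 1) [] y d, List.nil_append, horner_digits]
  have hlen : (PySem.List.pyRange 0 n 1).length = n.toNat := by
    rw [PySem.List.pyRange_one]; simp
  rw [hlen]
  ring

theorem S_insert_eq_alt (sys d y n : Int) : S_insert sys d y n = S_insert_alt sys d y n := by
  rw [alt_eq_rec]
  unfold S_insert
  rw [PySem.List.pyRange_one]
  have : (List.range (n - 0).toNat).map (fun k : Nat => (0 : Int) + k)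
       = (List.range n.toNat).map (fun k : Nat => ((k + 0 : Nat) : Int)) := by
    simp
  rw [this, loop_eq sys n.toNat 0 0 y d]
  simp

-- ===== VERDICT =====
theorem S_insert_spec : Claim_equal_S_insert := by
  intro sys d y n _ _
  unfold Spec_S_insert
  exact S_insert_eq_alt sys d y n
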